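-- pv_equiv track=rewrite | github.com/JanusQ/JanusQ | janusq/baseline/readout_mitigation/IBU/utils/data_utils.py | gen_ham_strings
-- ===== SOURCE A (Python) =====
-- def gen_ham_strings(string, d, prefix='', i=0):
--     """
--         Generate all strings that are Hamming distance d away from a given str
--     :param string: the string from which to compute all other strings
--     :param d: the desired Hamming distance
--     :param prefix: recursive parameters
--     :param i: recursive parameter
--     :return: list of strings hamming distance d from string
--     """
--     # Base Case
--     if d == 0:
--         return [prefix + string[i:]]
--
--     words = []
--
--     if '0' != string[i]:
--         words += gen_ham_strings(string, d - 1, prefix + '0', i + 1)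
--     if '1' != string[i]:
--         words += gen_ham_strings(string, d - 1, prefix + '1', i + 1)
--
--     if len(string) - i > d:
--         words += gen_ham_strings(string, d, prefix + string[i], i + 1)
--
--     return words
-- ===== SOURCE B (Python) =====
-- def gen_ham_strings(string, d, prefix='', i=0):
--     """Iterative DFS with an explicit stack instead of recursion."""
--     results = []
--     stack = [(i, d, prefix)]
--     while stack:
--         j, k, pre = stack.pop()
--         if k == 0:
--             results.append(pre + string[j:])
--             continue
--         c = string[j]
--         # push continuations in reverse so they pop in '0', '1', keep order
--         if len(string) - j > k:
--             stack.append((j + 1, k, pre + c))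
--         if c != '1':
--             stack.append((j + 1, k - 1, pre + '1'))
--         if c != '0':
--             stack.append((j + 1, k - 1, pre + '0'))
--     return results
-- ===== Notes on version B (the rewrite author's own statement) =====
-- stated objective: alternative
-- what changed: Replaces A's recursion (building the result by concatenating lists returned from recursive calls) with an iterative depth-first search over an explicit stack of (index, distance, prefix) states, pushing the continuations in reverse so the emitted order is identical; Pre_ excludes exactly the inputs (d < 0, d > len(string) - i, or i < -len(string) with d != 0) on which A raises IndexError.
import Mathlib
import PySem

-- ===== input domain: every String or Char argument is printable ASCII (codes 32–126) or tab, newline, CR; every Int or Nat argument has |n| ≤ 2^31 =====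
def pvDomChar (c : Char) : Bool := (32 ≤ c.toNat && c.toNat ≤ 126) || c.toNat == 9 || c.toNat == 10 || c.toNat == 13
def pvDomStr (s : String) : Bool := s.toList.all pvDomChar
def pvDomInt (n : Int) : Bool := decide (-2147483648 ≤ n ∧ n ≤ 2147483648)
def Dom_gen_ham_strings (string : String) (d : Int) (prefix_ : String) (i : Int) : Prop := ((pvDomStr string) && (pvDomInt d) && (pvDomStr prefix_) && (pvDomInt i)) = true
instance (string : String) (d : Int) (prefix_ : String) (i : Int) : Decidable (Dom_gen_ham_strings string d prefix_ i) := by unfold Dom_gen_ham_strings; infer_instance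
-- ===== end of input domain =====

-- B re-implements A's recursive enumeration as an iterative DFS over an explicit stack
-- (alternative decomposition, same output order); equivalence is about return values on
-- the inputs where the Python A returns (Pre_ excludes exactly its IndexError inputs).
-- In both ports the Nat fuel argument is only a totality guard (it always exceeds the
-- recursion depth / iteration count); `none` from pyGet? is Python's IndexError (those
-- inputs are outside Pre_; the ports return a junk value there).

-- ===== PORT A =====
-- literal port of A's recursion, on the code-point list
def gen_ham_chars (s : List Char) (fuel : Nat) (d : Int) (prefix_ : List Char) (i : Int) : List (List Char) :=
  match fuel with
  | 0 => []
  | fuel + 1 =>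
    if d = 0 then [prefix_ ++ PySem.List.slice s (some i) none] else
    match PySem.List.pyGet? s i with
    | none => []
    | some c =>
      (if '0' ≠ c then gen_ham_chars s fuel (d - 1) (prefix_ ++ ['0']) (i + 1) else []) ++
      ((if '1' ≠ c then gen_ham_chars s fuel (d - 1) (prefix_ ++ ['1']) (i + 1) else []) ++
       (if (s.length : Int) - i > d then gen_ham_chars s fuel d (prefix_ ++ [c]) (i + 1) else []))

def gen_ham_strings (string : String) (d : Int) (prefix_ : String) (i : Int) : List String :=
  (gen_ham_chars string.toList (string.toList.length + 1 + i.natAbs) d prefix_.toList i).map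
    (fun cs => String.ofList cs)

-- ===== PORT B =====
-- the while-loop of B: pop a frame, emit or push the three continuations in reverse order
def gen_ham_loop (s : List Char) (fuel : Nat) (stack : List (Int × Int × List Char))
    (acc : List (List Char)) : List (List Char) :=
  match fuel with
  | 0 => acc
  | fuel + 1 =>
    match stack with
    | [] => acc
    | (j, k, pre) :: rest =>
      if k = 0 then gen_ham_loop s fuel rest (acc ++ [pre ++ PySem.List.slice s (some j) none])
      else
        match PySem.List.pyGet? s j with
        | none => acc
        | some c =>
          let rest1 := if (s.length : Int) - j > k then (j + 1, k, pre ++ [c]) :: rest else rest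
          let rest2 := if c ≠ '1' then (j + 1, k - 1, pre ++ ['1']) :: rest1 else rest1
          let rest3 := if c ≠ '0' then (j + 1, k - 1, pre ++ ['0']) :: rest2 else rest2
          gen_ham_loop s fuel rest3 acc

def gen_ham_strings_alt (string : String) (d : Int) (prefix_ : String) (i : Int) : List String :=
  (gen_ham_loop string.toList (4 ^ (string.toList.length + 1 + i.natAbs))
      [(i, d, prefix_.toList)] []).map (fun cs => String.ofList cs)

-- ===== PRECONDITION & SPEC =====
-- Pre_ is exactly the set where the Python A returns: otherwise string[i] raises
-- IndexError somewhere in the recursion (d < 0, d > len - i, or i < -len with d ≠ 0).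
def Pre_gen_ham_strings (string : String) (d : Int) (prefix_ : String) (i : Int) : Prop :=
  d = 0 ∨ (0 < d ∧ -(string.toList.length : Int) ≤ i ∧ d ≤ (string.toList.length : Int) - i)
instance (string : String) (d : Int) (prefix_ : String) (i : Int) : Decidable (Pre_gen_ham_strings string d prefix_ i) := by unfold Pre_gen_ham_strings; infer_instance

def pvWitness_gen_ham_strings : String × Int × String × Int := ("01a", 2, "", 0)

def Spec_gen_ham_strings (string : String) (d : Int) (prefix_ : String) (i : Int) (out : List String) : Prop := out = gen_ham_strings_alt string d prefix_ i
instance (string : String) (d : Int) (prefix_ : String) (i : Int) (out : List String) : Decidable (Spec_gen_ham_strings string d prefix_ i out) := by unfold Spec_gen_ham_strings; infer_instance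

-- ===== CLAIM (what is proved, stated in full; the proofs are below) =====
def Claim_equal_gen_ham_strings : Prop := ∀ (string : String) (d : Int) (prefix_ : String) (i : Int), Dom_gen_ham_strings string d prefix_ i → Pre_gen_ham_strings string d prefix_ i → Spec_gen_ham_strings string d prefix_ i (gen_ham_strings string d prefix_ i)

-- ===== LEMMAS AND PROOFS =====

-- index bound extracted from a successful string[i] access
lemma ham_index_bounds (s : List Char) (i : Int) (c : Char)
    (h : PySem.List.pyGet? s i = some c) : -(s.length : Int) ≤ i ∧ i < (s.length : Int) := by
  by_contra hc
  rw [show (¬(-(s.length : Int) ≤ i ∧ i < (s.length : Int))) = ¬ PySem.Raise.InRange s.length i from rfl,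
     ← PySem.List.pyGet?_eq_none_iff] at hc
  simp [hc] at h

-- the fuel-free reference recursion both ports are reduced to
def ham (s : List Char) (d : Int) (pre : List Char) (i : Int) : List (List Char) :=
  if d = 0 then [pre ++ PySem.List.slice s (some i) none] else
  match h : PySem.List.pyGet? s i with
  | none => []
  | some c =>
    (if '0' ≠ c then ham s (d - 1) (pre ++ ['0']) (i + 1) else []) ++
    ((if '1' ≠ c then ham s (d - 1) (pre ++ ['1']) (i + 1) else []) ++
     (if (s.length : Int) - i > d then ham s d (pre ++ [c]) (i + 1) else []))
termination_by ((s.length : Int) - i).toNat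
decreasing_by
  all_goals
    have := ham_index_bounds s i c h
    omega

lemma ham_zero (s : List Char) (pre : List Char) (i : Int) :
    ham s 0 pre i = [pre ++ PySem.List.slice s (some i) none] := by
  rw [ham.eq_def]
  simp

lemma ham_expand (s : List Char) (d : Int) (pre : List Char) (i : Int) (c : Char)
    (hd : ¬ d = 0) (hc : PySem.List.pyGet? s i = some c) :
    ham s d pre i =
      (if '0' ≠ c then ham s (d - 1) (pre ++ ['0']) (i + 1) else []) ++
      ((if '1' ≠ c then ham s (d - 1) (pre ++ ['1']) (i + 1) else []) ++
       (if (s.length : Int) - i > d then ham s d (pre ++ [c]) (i + 1) else [])) := by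
  rw [ham.eq_def]
  rw [if_neg hd]
  split
  next h => rw [hc] at h; cases h
  next c' h => rw [hc] at h; injection h with h; subst h; rfl

-- port A computes `ham` whenever its fuel exceeds the length of the unread tail
lemma gen_ham_chars_eq_ham (s : List Char) (fuel : Nat) :
    ∀ (d : Int) (pre : List Char) (i : Int), ((s.length : Int) - i).toNat < fuel →
    gen_ham_chars s fuel d pre i = ham s d pre i := by
  induction fuel with
  | zero => intro d pre i h; omega
  | succ fuel ih =>
    intro d pre i hfuel
    rw [gen_ham_chars]
    by_cases hd : d = 0
    · rw [if_pos hd, hd, ham_zero]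
    · rw [if_neg hd]
      cases hc : PySem.List.pyGet? s i with
      | none =>
        show ([] : List (List Char)) = ham s d pre i
        rw [ham.eq_def, if_neg hd]
        split
        next => rfl
        next c' h' => rw [hc] at h'; simp at h'
      | some c =>
        have hb := ham_index_bounds s i c hc
        have hrec : ((s.length : Int) - (i + 1)).toNat < fuel := by omega
        show ((if '0' ≠ c then gen_ham_chars s fuel (d - 1) (pre ++ ['0']) (i + 1) else []) ++
          ((if '1' ≠ c then gen_ham_chars s fuel (d - 1) (pre ++ ['1']) (i + 1) else []) ++
           (if (s.length : Int) - i > d then gen_ham_chars s fuel d (pre ++ [c]) (i + 1) else []))) = ham s d pre i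
        rw [ham_expand s d pre i c hd hc, ih (d - 1) (pre ++ ['0']) (i + 1) hrec,
          ih (d - 1) (pre ++ ['1']) (i + 1) hrec, ih d (pre ++ [c]) (i + 1) hrec]

-- the invariant kept by every frame on B's stack: its (j, k) is a returning input of A
def HamInv (L : Nat) (f : Int × Int × List Char) : Prop :=
  f.2.1 = 0 ∨ (0 < f.2.1 ∧ -(L : Int) ≤ f.1 ∧ f.2.1 ≤ (L : Int) - f.1)

-- weight of the whole stack: bounds the number of loop iterations still to run
def hamStackM (L : Nat) (stack : List (Int × Int × List Char)) : Nat :=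
  (stack.map (fun f => 4 ^ (((L : Int) + 1 - f.1).toNat))).sum

-- popping a finished frame shrinks the stack measure
lemma ham_dec_pop (L : Nat) (j k : Int) (pre : List Char) (rest : List (Int × Int × List Char)) :
    hamStackM L rest < hamStackM L ((j, k, pre) :: rest) := by
  simp only [hamStackM, List.map_cons, List.sum_cons]
  have := Nat.pow_pos (a := 4) (n := ((L : Int) + 1 - j).toNat) (by norm_num)
  omega

-- expanding a frame replaces it by up to three lighter frames
lemma ham_dec_push (s : List Char) (j k : Int) (pre : List Char) (c : Char)
    (rest : List (Int × Int × List Char)) (h : PySem.List.pyGet? s j = some c) :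
    hamStackM s.length
      (if c ≠ '0' then (j + 1, k - 1, pre ++ ['0']) ::
        (if c ≠ '1' then (j + 1, k - 1, pre ++ ['1']) ::
          (if (s.length : Int) - j > k then (j + 1, k, pre ++ [c]) :: rest else rest)
         else (if (s.length : Int) - j > k then (j + 1, k, pre ++ [c]) :: rest else rest))
       else (if c ≠ '1' then (j + 1, k - 1, pre ++ ['1']) ::
          (if (s.length : Int) - j > k then (j + 1, k, pre ++ [c]) :: rest else rest)
         else (if (s.length : Int) - j > k then (j + 1, k, pre ++ [c]) :: rest else rest)))
      < hamStackM s.length ((j, k, pre) :: rest) := by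
  have hb := ham_index_bounds s j c h
  have he : (((s.length : Int) + 1 - j).toNat) = (((s.length : Int) - j).toNat) + 1 := by omega
  have hee : (((s.length : Int) + 1 - (j + 1)).toNat) = ((s.length : Int) - j).toNat := by omega
  simp only [hamStackM]
  split_ifs <;>
    · simp only [List.map_cons, List.sum_cons, he, hee, pow_succ]
      have := Nat.pow_pos (a := 4) (n := ((s.length : Int) - j).toNat) (by norm_num)
      omega

-- B's loop computes acc ++ the concatenation of A's results for the stacked frames
lemma gen_ham_loop_spec (s : List Char) (fuel : Nat) :
    ∀ (stack : List (Int × Int × List Char)) (acc : List (List Char)),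
    (∀ f ∈ stack, HamInv s.length f) → hamStackM s.length stack ≤ fuel →
    gen_ham_loop s fuel stack acc
      = acc ++ stack.flatMap (fun f => ham s f.2.1 f.2.2 f.1) := by
  induction fuel with
  | zero =>
    intro stack acc _ hm
    cases stack with
    | nil => simp [gen_ham_loop]
    | cons f rest =>
      exfalso
      obtain ⟨j, k, pre⟩ := f
      have := ham_dec_pop s.length j k pre rest
      omega
  | succ fuel ih =>
    intro stack acc hinv hm
    cases stack with
    | nil => simp [gen_ham_loop]
    | cons f rest =>
      obtain ⟨j, k, pre⟩ := f
      rw [gen_ham_loop]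
      by_cases hk : k = 0
      · rw [if_pos hk]
        rw [ih rest (acc ++ [pre ++ PySem.List.slice s (some j) none])
             (fun f hf => hinv f (List.mem_cons_of_mem _ hf))
             (by have := ham_dec_pop s.length j k pre rest; omega)]
        subst hk
        simp [ham_zero]
      · rw [if_neg hk]
        have hh := hinv (j, k, pre) (List.mem_cons_self ..)
        unfold HamInv at hh
        simp only [hk, false_or] at hh
        obtain ⟨hkpos, hjlo, hjhi⟩ := hh
        cases hc : PySem.List.pyGet? s j with
        | none =>
          exfalso
          rw [PySem.List.pyGet?_eq_none_iff] at hc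
          unfold PySem.Raise.InRange at hc
          omega
        | some c =>
          have hb := ham_index_bounds s j c hc
          have hstep : ∀ f ∈ (if c ≠ '0' then (j + 1, k - 1, pre ++ ['0']) ::
                (if c ≠ '1' then (j + 1, k - 1, pre ++ ['1']) ::
                  (if (s.length : Int) - j > k then (j + 1, k, pre ++ [c]) :: rest else rest)
                 else (if (s.length : Int) - j > k then (j + 1, k, pre ++ [c]) :: rest else rest))
               else (if c ≠ '1' then (j + 1, k - 1, pre ++ ['1']) ::
                  (if (s.length : Int) - j > k then (j + 1, k, pre ++ [c]) :: rest else rest)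
                 else (if (s.length : Int) - j > k then (j + 1, k, pre ++ [c]) :: rest else rest))),
              HamInv s.length f := by
            intro f hf
            have hcases : f = (j + 1, k - 1, pre ++ ['0']) ∨ f = (j + 1, k - 1, pre ++ ['1']) ∨
                (f = (j + 1, k, pre ++ [c]) ∧ (s.length : Int) - j > k) ∨ f ∈ rest := by
              split_ifs at hf <;> (try simp only [List.mem_cons] at hf) <;> tauto
            rcases hcases with hf' | hf' | ⟨hf', hkeep⟩ | hf'
            · subst hf'; unfold HamInv; simp only; omega
            · subst hf'; unfold HamInv; simp only; omega
            · subst hf'; unfold HamInv; simp only; omega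
            · exact hinv f (List.mem_cons_of_mem _ hf')
          have hmstep := ham_dec_push s j k pre c rest hc
          show gen_ham_loop s fuel (if c ≠ '0' then (j + 1, k - 1, pre ++ ['0']) ::
                (if c ≠ '1' then (j + 1, k - 1, pre ++ ['1']) ::
                  (if (s.length : Int) - j > k then (j + 1, k, pre ++ [c]) :: rest else rest)
                 else (if (s.length : Int) - j > k then (j + 1, k, pre ++ [c]) :: rest else rest))
               else (if c ≠ '1' then (j + 1, k - 1, pre ++ ['1']) ::
                  (if (s.length : Int) - j > k then (j + 1, k, pre ++ [c]) :: rest else rest)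
                 else (if (s.length : Int) - j > k then (j + 1, k, pre ++ [c]) :: rest else rest))) acc
            = acc ++ List.flatMap (fun f => ham s f.2.1 f.2.2 f.1) ((j, k, pre) :: rest)
          rw [ih _ acc hstep (by omega)]
          rw [List.flatMap_cons]
          rw [ham_expand s k pre j c hk hc]
          by_cases h0 : c = '0' <;> by_cases h1 : c = '1' <;>
            by_cases hkeep : (s.length : Int) - j > k <;>
            simp [h0, h1, hkeep, eq_comm, List.flatMap_cons, List.append_assoc]

-- ===== VERDICT (by name: the statement is the Claim_ definition above) =====
theorem gen_ham_strings_spec : Claim_equal_gen_ham_strings := by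
  intro string d prefix_ i _ hpre
  unfold Spec_gen_ham_strings gen_ham_strings gen_ham_strings_alt
  rw [gen_ham_chars_eq_ham string.toList _ d prefix_.toList i (by omega)]
  rw [gen_ham_loop_spec string.toList _ [(i, d, prefix_.toList)] []
      (by intro f hf; simp at hf; subst hf; exact hpre)
      (by
        show hamStackM string.toList.length [(i, d, prefix_.toList)] ≤ _
        simp only [hamStackM, List.map_cons, List.map_nil, List.sum_cons, List.sum_nil,
          Nat.add_zero]
        exact Nat.pow_le_pow_right (by norm_num) (by omega))]
  simp
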